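-- pv_equiv track=rewrite | github.com/szawan/TranscriptomicsPipeline | 00a_handle_multiplexing.py | group_files_by_common_postfix
-- ===== SOURCE A (Python) =====
-- def group_files_by_common_postfix(file_names):
--     grouped_files = {}
--
--     for file_name in file_names:
--         # Split the file name into parts based on underscores
--         parts = file_name.split("_")
--
--         # Check if the file name has at least one underscore
--         if len(parts) > 1:
--             # Use the last part as the common prefix for grouping
--             common_postfix = parts[-1]
--
--             # Add the file to the corresponding group
--             if common_postfix in grouped_files:
--                 grouped_files[common_postfix].append(file_name)
--             else:
--                 grouped_files[common_postfix] = [file_name]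
--
--     return grouped_files
-- ===== SOURCE B (Python) =====
-- def group_files_by_common_postfix(file_names):
--     # Two-pass grouping: pair each eligible name with its postfix once, then
--     # build the dict with one filter per distinct postfix (first-appearance order).
--     def postfix(name):
--         parts = name.split("_")
--         return parts[-1] if len(parts) > 1 else None
--
--     keyed = [(k, f) for f in file_names if (k := postfix(f)) is not None]
--     return {k: [f for kk, f in keyed if kk == k]
--             for k in dict.fromkeys(k for k, _ in keyed)}
-- ===== Notes on version B (the rewrite author's own statement) =====
-- stated objective: alternative
-- what changed: Replaces A's single-pass dict accumulation (membership test + append/create per file) with a two-pass strategy: pair each eligible file with its postfix once, dedup the postfixes in first-appearance order, then build each group by one filter pass per distinct postfix.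
import Mathlib
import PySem

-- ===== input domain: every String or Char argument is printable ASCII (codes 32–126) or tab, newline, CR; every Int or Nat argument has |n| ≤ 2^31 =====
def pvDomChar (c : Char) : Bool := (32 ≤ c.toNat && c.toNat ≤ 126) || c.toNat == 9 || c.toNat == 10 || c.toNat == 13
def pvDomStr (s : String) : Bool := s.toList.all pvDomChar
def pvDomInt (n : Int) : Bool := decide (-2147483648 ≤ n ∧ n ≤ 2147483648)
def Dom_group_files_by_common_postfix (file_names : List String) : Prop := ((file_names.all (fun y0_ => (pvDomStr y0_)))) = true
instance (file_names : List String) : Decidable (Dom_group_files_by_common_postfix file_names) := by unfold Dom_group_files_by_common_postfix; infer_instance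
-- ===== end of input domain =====

-- B replaces A's single-pass dict accumulation with pair-then-dedup-then-filter grouping; objective: alternative decomposition, same return value.

-- ===== PORT A =====
def group_files_by_common_postfix (file_names : List String) : List (String × List String) :=
  (file_names.foldl (fun grouped_files file_name =>
    let parts := (PySem.Str.split? file_name "_").getD []
    if parts.length > 1 then
      let common_postfix := (PySem.List.pyGet? parts (-1)).getD ""
      if grouped_files.contains common_postfix then
        grouped_files.modify common_postfix [] (fun l => l ++ [file_name])
      else
        grouped_files.insert common_postfix [file_name]
    else grouped_files) PySem.Dict.empty).items

-- ===== PORT B =====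
def pvPostfix? (name : String) : Option String :=
  let parts := (PySem.Str.split? name "_").getD []
  if parts.length > 1 then some ((PySem.List.pyGet? parts (-1)).getD "") else none

def group_files_by_common_postfix_alt (file_names : List String) : List (String × List String) :=
  let keyed := file_names.filterMap (fun f => (pvPostfix? f).map (fun k => (k, f)))
  (PySem.List.dedup (keyed.map (·.1))).map
    (fun k => (k, (keyed.filter (fun p => p.1 == k)).map (·.2)))

-- ===== PRECONDITION & SPEC =====
def Spec_group_files_by_common_postfix (file_names : List String) (out : List (String × List String)) : Prop := out = group_files_by_common_postfix_alt file_names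
instance (file_names : List String) (out : List (String × List String)) : Decidable (Spec_group_files_by_common_postfix file_names out) := by unfold Spec_group_files_by_common_postfix; infer_instance

-- ===== CLAIM (what is proved, stated in full; the proofs are below) =====
def Claim_equal_group_files_by_common_postfix : Prop := ∀ (file_names : List String), Dom_group_files_by_common_postfix file_names → Spec_group_files_by_common_postfix file_names (group_files_by_common_postfix file_names)

-- ===== LEMMAS AND PROOFS =====

-- A's loop body, as a named step function
def pvStepA (d : PySem.Dict String (List String)) (file_name : String) : PySem.Dict String (List String) :=
  let parts := (PySem.Str.split? file_name "_").getD []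
  if parts.length > 1 then
    let common_postfix := (PySem.List.pyGet? parts (-1)).getD ""
    if d.contains common_postfix then
      d.modify common_postfix [] (fun l => l ++ [file_name])
    else
      d.insert common_postfix [file_name]
  else d

-- the grouping step on (postfix, name) pairs
def pvStepP (d : PySem.Dict String (List String)) (p : String × String) : PySem.Dict String (List String) :=
  d.modify p.1 [] (fun l => l ++ [p.2])

lemma pvStepA_eq (d : PySem.Dict String (List String)) (f : String) :
    pvStepA d f = match pvPostfix? f with
      | none => d
      | some k => pvStepP d (k, f) := by
  unfold pvStepA pvPostfix?
  by_cases h : ((PySem.Str.split? f "_").getD []).length > 1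
  · simp only [h, if_pos]
    set k := (PySem.List.pyGet? ((PySem.Str.split? f "_").getD []) (-1)).getD "" with hk
    by_cases hc : d.contains k = true
    · simp [hc, pvStepP]
    · simp only [Bool.not_eq_true] at hc
      simp [hc, pvStepP, PySem.Dict.modify, PySem.Dict.getD_of_not_contains _ _ hc]
  · simp [h]

lemma pvFoldA_eq_foldP (l : List String) (d : PySem.Dict String (List String)) :
    l.foldl pvStepA d
      = (l.filterMap (fun f => (pvPostfix? f).map (fun k => (k, f)))).foldl pvStepP d := by
  induction l generalizing d with
  | nil => rfl
  | cons f l ih =>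
    simp only [List.foldl_cons, List.filterMap_cons]
    rw [pvStepA_eq]
    cases hp : pvPostfix? f with
    | none => simp [ih]
    | some k => simp [ih]

-- a dict with Nodup keys is exactly its key list paired with its getD values
lemma pvItemsAux (items : List (String × List String))
    (h : (items.map (fun p => p.1)).Nodup) :
    items.map (fun p => (p.1, (PySem.Dict.mk items).getD p.1 [])) = items := by
  induction items with
  | nil => rfl
  | cons p rest ih =>
    obtain ⟨k, v⟩ := p
    simp only [List.map_cons, List.nodup_cons] at h
    obtain ⟨hk, hrest⟩ := h
    have hself : (PySem.Dict.mk ((k, v) :: rest)).getD k [] = v := by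
      simp [PySem.Dict.getD, PySem.Dict.get?_mk_cons]
    simp only [List.map_cons, hself]
    congr 1
    have hcongr : ∀ q ∈ rest,
        (q.1, (PySem.Dict.mk ((k, v) :: rest)).getD q.1 [])
          = (q.1, (PySem.Dict.mk rest).getD q.1 []) := by
      intro q hq
      have hne : (k == q.1) = false := by
        simp only [beq_eq_false_iff_ne, ne_eq]
        intro he; exact hk (he ▸ List.mem_map_of_mem hq)
      simp [PySem.Dict.getD, PySem.Dict.get?_mk_cons, hne]
    calc rest.map (fun q => (q.1, (PySem.Dict.mk ((k, v) :: rest)).getD q.1 []))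
        = rest.map (fun q => (q.1, (PySem.Dict.mk rest).getD q.1 [])) :=
          List.map_congr_left hcongr
      _ = rest := ih hrest

lemma pvDict_items (d : PySem.Dict String (List String)) (h : d.keys.Nodup) :
    d.keys.map (fun k => (k, d.getD k [])) = d.items := by
  obtain ⟨its⟩ := d
  have h' : (its.map (fun p => p.1)).Nodup := by simpa [PySem.Dict.keys] using h
  have := pvItemsAux its h'
  simpa [PySem.Dict.keys, List.map_map, Function.comp] using this

-- ===== VERDICT (by name: the statement is the Claim_ definition above) =====
theorem group_files_by_common_postfix_spec : Claim_equal_group_files_by_common_postfix := by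
  intro file_names _
  unfold Spec_group_files_by_common_postfix group_files_by_common_postfix group_files_by_common_postfix_alt
  have hA : (file_names.foldl (fun grouped_files file_name =>
      let parts := (PySem.Str.split? file_name "_").getD []
      if parts.length > 1 then
        let common_postfix := (PySem.List.pyGet? parts (-1)).getD ""
        if grouped_files.contains common_postfix then
          grouped_files.modify common_postfix [] (fun l => l ++ [file_name])
        else
          grouped_files.insert common_postfix [file_name]
      else grouped_files) PySem.Dict.empty)
      = file_names.foldl pvStepA PySem.Dict.empty := rfl
  rw [hA, pvFoldA_eq_foldP]
  set keyed := file_names.filterMap (fun f => (pvPostfix? f).map (fun k => (k, f))) with hkeyed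
  set d := keyed.foldl pvStepP PySem.Dict.empty with hd
  have hkeys : d.keys = PySem.Set.ofList (keyed.map (fun p => p.1)) := by
    rw [hd]
    have := PySem.Dict.keys_foldl_modify_key keyed (fun p => p.1) []
      (fun _ p => (fun l => l ++ [p.2])) PySem.Dict.empty
    simpa [pvStepP, PySem.Dict.keys_empty, PySem.Set.update_nil_left] using this
  have hnodup : d.keys.Nodup := by
    rw [hkeys]; exact PySem.Set.nodup_ofList _
  have hgetD : ∀ k, d.getD k [] = (keyed.filter (fun p => p.1 == k)).map (fun p => p.2) := by
    intro k
    rw [hd]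
    have := PySem.Dict.getD_foldl_modify_append keyed PySem.Dict.empty k
    simpa [pvStepP, PySem.Dict.getD, PySem.Dict.get?] using this
  rw [← pvDict_items d hnodup, hkeys]
  simp only [PySem.List.dedup_eq_ofList]
  apply List.map_congr_left
  intro k _
  rw [hgetD]
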